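-- pv_equiv track=rewrite | github.com/skeeperloyaltie/resolution_FOL | lab01.py | resolve_all
-- ===== SOURCE A (Python) =====
-- import copy
--
-- def resolve(c1, c2):
--     """Performs the resolution operation on two clauses."""
--     resolvents = []
--     for literal1 in c1:
--         for literal2 in c2:
--             if literal1 == "!" + literal2 or literal2 == "!" + literal1:
--                 # Found complementary literals, so perform the resolution operation
--                 resolvent = list(set(c1) | set(c2))  # Union of the two clauses
--                 if literal1 in resolvent:
--                     resolvent.remove(literal1)
--                 if literal2.replace("!", "") in resolvent:
--                     resolvent.remove(literal2.replace("!", ""))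
--                 resolvents.append(resolvent)
--     return resolvents
--
-- def resolve_all(clauses):
--     """Applies the resolution rule to all possible pairs of clauses."""
--     new_clauses = copy.deepcopy(clauses)
--     while True:
--         prev_clauses = copy.deepcopy(new_clauses)
--         for i in range(len(prev_clauses)):
--             for j in range(i+1, len(prev_clauses)):
--                 resolvents = resolve(prev_clauses[i], prev_clauses[j])
--                 for resolvent in resolvents:
--                     if resolvent not in new_clauses and resolvent not in prev_clauses:
--                         new_clauses.append(resolvent)
--         if new_clauses == prev_clauses:
--             break
--     if [] in new_clauses:
--         return "no"
--     else:
--         return "yes"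
-- ===== SOURCE B (Python) =====
-- def _resolvents(c1, c2):
--     """All resolvents of the ordered clause pair (c1, c2), built by filtering
--     the deduplicated union instead of set-union + remove."""
--     merged = list(dict.fromkeys(c1 + c2))
--     out = []
--     for l1 in c1:
--         for l2 in c2:
--             if l1 == "!" + l2 or l2 == "!" + l1:
--                 drop = l2.replace("!", "")
--                 out.append([x for x in merged if x != l1 and x != drop])
--     return out
--
-- def resolve_all(clauses):
--     """Given-clause saturation: every ordered index pair (i, j) is resolved
--     exactly once (j ranges over the current frontier), instead of re-resolving
--     all pairs on every fixpoint round."""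
--     L = [list(c) for c in clauses]
--     lo = 0
--     while lo < len(L):
--         cur, hi = list(L), len(L)
--         for i in range(hi):
--             for j in range(max(i + 1, lo), hi):
--                 for r in _resolvents(cur[i], cur[j]):
--                     if r not in L:
--                         L.append(r)
--         lo = hi
--     return "no" if [] in L else "yes"
-- ===== Notes on version B (the rewrite author's own statement) =====
-- stated objective: faster
-- what changed: Given-clause saturation: each ordered clause pair is resolved exactly once against a moving frontier (and per-pair resolvents are built by filtering the deduplicated concatenation), instead of re-resolving every pair of the whole list on every fixpoint round with set-union and element removal.
import Mathlib
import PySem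

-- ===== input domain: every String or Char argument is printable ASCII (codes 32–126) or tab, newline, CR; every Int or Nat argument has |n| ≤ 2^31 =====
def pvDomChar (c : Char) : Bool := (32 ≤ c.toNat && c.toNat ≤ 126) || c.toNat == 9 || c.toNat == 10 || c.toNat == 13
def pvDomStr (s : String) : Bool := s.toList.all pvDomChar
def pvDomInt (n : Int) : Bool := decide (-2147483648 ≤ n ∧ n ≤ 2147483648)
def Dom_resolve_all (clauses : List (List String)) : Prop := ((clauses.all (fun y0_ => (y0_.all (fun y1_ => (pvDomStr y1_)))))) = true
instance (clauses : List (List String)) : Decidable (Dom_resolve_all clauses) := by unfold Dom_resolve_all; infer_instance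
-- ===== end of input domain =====

-- B replaces A's round-based fixpoint saturation (which re-resolves every clause pair on
-- every round) by a given-clause loop that resolves each ordered pair exactly once against
-- a moving frontier; per-pair resolvents are built by filtering the deduplicated
-- concatenation instead of set-union followed by removals.
-- Python's iteration order over 'set(c1) | set(c2)' is unspecified; both ports use
-- first-insertion order (PySem.Set); the returned "yes"/"no" was checked against CPython
-- under several hash seeds. Both loops carry a fuel bound as a totality guard only.

-- ===== PORT A =====
-- 'if x in l: l.remove(x)'
def pvRemoveIfMem (l : List String) (x : String) : List String :=
  if l.contains x then (PySem.List.remove? l x).getD l else l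

-- Python 'resolve(c1, c2)'
def pvResolve (c1 c2 : List String) : List (List String) :=
  c1.foldl (fun resolvents literal1 =>
    c2.foldl (fun resolvents literal2 =>
      if literal1 == "!" ++ literal2 || literal2 == "!" ++ literal1 then
        resolvents ++ [pvRemoveIfMem
          (pvRemoveIfMem (PySem.Set.union (PySem.Set.ofList c1) c2) literal1)
          (PySem.Str.replace literal2 "!" "")]
      else resolvents) resolvents) []

-- 'if resolvent not in new_clauses and resolvent not in prev_clauses: new_clauses.append(resolvent)'
def pvAddNewA (prev acc : List (List String)) (r : List String) : List (List String) :=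
  if !(acc.contains r) && !(prev.contains r) then acc ++ [r] else acc

-- one round: 'for i in range(len(prev)): for j in range(i+1, len(prev)): …'
def pvRoundA (prev acc0 : List (List String)) : List (List String) :=
  (List.range prev.length).foldl (fun acc i =>
    (List.range' (i+1) (prev.length - (i+1))).foldl (fun acc j =>
      (pvResolve (prev.getD i []) (prev.getD j [])).foldl (pvAddNewA prev) acc) acc) acc0

-- 'while True: …' (fuel = totality guard)
def pvLoopA : Nat → List (List String) → List (List String)
  | 0, nc => nc
  | f+1, nc =>
    let nc' := pvRoundA nc nc
    if nc' == nc then nc else pvLoopA f nc'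

def pvFuel (clauses : List (List String)) : Nat :=
  let m := clauses.flatten.length + 2
  m ^ m + clauses.length + 2

def resolve_all (clauses : List (List String)) : String :=
  if (pvLoopA (pvFuel clauses) clauses).contains [] then "no" else "yes"

-- ===== PORT B =====
-- Python '_resolvents(c1, c2)' of Source B
def pvResolventsB (c1 c2 : List String) : List (List String) :=
  let merged := PySem.List.dedup (c1 ++ c2)
  c1.foldl (fun out l1 =>
    c2.foldl (fun out l2 =>
      if l1 == "!" ++ l2 || l2 == "!" ++ l1 then
        out ++ [merged.filter (fun x => x != l1 && x != PySem.Str.replace l2 "!" "")]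
      else out) out) []

-- 'if r not in L: L.append(r)'
def pvAddNewB (acc : List (List String)) (r : List String) : List (List String) :=
  if !(acc.contains r) then acc ++ [r] else acc

-- one frontier pass: 'for i in range(hi): for j in range(max(i+1, lo), hi): …'
def pvRoundB (cur : List (List String)) (lo : Nat) (acc0 : List (List String)) : List (List String) :=
  (List.range cur.length).foldl (fun acc i =>
    (List.range' (max (i+1) lo) (cur.length - max (i+1) lo)).foldl (fun acc j =>
      (pvResolventsB (cur.getD i []) (cur.getD j [])).foldl pvAddNewB acc) acc) acc0

-- 'while lo < len(L): …' (fuel = totality guard)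
def pvLoopB : Nat → List (List String) → Nat → List (List String)
  | 0, L, _ => L
  | f+1, L, lo => if lo < L.length then pvLoopB f (pvRoundB L lo L) L.length else L

def resolve_all_alt (clauses : List (List String)) : String :=
  if (pvLoopB (pvFuel clauses) clauses 0).contains [] then "no" else "yes"

-- ===== PRECONDITION & SPEC =====
def Spec_resolve_all (clauses : List (List String)) (out : String) : Prop := out = resolve_all_alt clauses
instance (clauses : List (List String)) (out : String) : Decidable (Spec_resolve_all clauses out) := by unfold Spec_resolve_all; infer_instance

-- ===== CLAIM (what is proved, stated in full; the proofs are below) =====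
def Claim_equal_resolve_all : Prop := ∀ (clauses : List (List String)), Dom_resolve_all clauses → Spec_resolve_all clauses (resolve_all clauses)

-- ===== LEMMAS AND PROOFS =====

-- generic fold facts ---------------------------------------------------------

theorem pvFoldlPrefix {σ α : Type} (f : List σ → α → List σ)
    (hf : ∀ s a, s <+: f s a) : ∀ (l : List α) (s : List σ), s <+: l.foldl f s := by
  intro l
  induction l with
  | nil => intro s; exact List.prefix_rfl
  | cons a t ih => intro s; exact (hf s a).trans (ih (f s a))

theorem pvFoldlPres {σ α : Type} (f : σ → α → σ) (P : σ → Prop)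
    (mono : ∀ s a, P s → P (f s a)) : ∀ (l : List α) (s : σ), P s → P (l.foldl f s) := by
  intro l
  induction l with
  | nil => intro s h; exact h
  | cons a t ih => intro s h; exact ih (f s a) (mono s a h)

theorem pvFoldlReach {σ α : Type} (f : σ → α → σ) (I P : σ → Prop)
    (monoI : ∀ s a, I s → I (f s a)) (monoP : ∀ s a, P s → P (f s a))
    (a : α) (est : ∀ s, I s → P (f s a)) :
    ∀ (l : List α), a ∈ l → ∀ s, I s → P (l.foldl f s) := by
  intro l
  induction l with
  | nil => intro ha; cases ha
  | cons b t ih =>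
    intro ha s hI
    rcases List.mem_cons.mp ha with h | hat
    · subst h
      exact pvFoldlPres f P monoP t (f s a) (est s hI)
    · exact ih hat (f s b) (monoI s b hI)

theorem pvFoldlCongrInv {σ α : Type} (f g : σ → α → σ) (I : σ → Prop)
    (monoI : ∀ s a, I s → I (f s a)) (h : ∀ s a, I s → f s a = g s a) :
    ∀ (l : List α) (s : σ), I s → l.foldl f s = l.foldl g s := by
  intro l
  induction l with
  | nil => intro s _; rfl
  | cons a t ih =>
    intro s hI
    rw [List.foldl_cons, List.foldl_cons, ← h s a hI]
    exact ih (f s a) (monoI s a hI)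

-- step monotonicity ----------------------------------------------------------

theorem pvAddNewA_prefix (prev acc : List (List String)) (r : List String) :
    acc <+: pvAddNewA prev acc r := by
  unfold pvAddNewA
  split
  · exact List.prefix_append acc [r]
  · exact List.prefix_rfl

theorem pvPairFoldA_prefix (prev : List (List String)) (rs : List (List String))
    (acc : List (List String)) : acc <+: rs.foldl (pvAddNewA prev) acc :=
  pvFoldlPrefix _ (pvAddNewA_prefix prev) rs acc

theorem pvInnerA_prefix (prev : List (List String)) (i : Nat) (js : List Nat)
    (acc : List (List String)) :
    acc <+: js.foldl (fun acc j =>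
      (pvResolve (prev.getD i []) (prev.getD j [])).foldl (pvAddNewA prev) acc) acc :=
  pvFoldlPrefix _ (fun s _j => pvPairFoldA_prefix prev _ s) js acc

theorem pvRoundA_prefix (prev acc0 : List (List String)) : acc0 <+: pvRoundA prev acc0 := by
  unfold pvRoundA
  exact pvFoldlPrefix _ (fun s i => pvInnerA_prefix prev i _ s) _ acc0

-- the per-pair resolvent lists agree -----------------------------------------

theorem pvRemoveIfMem_eq_filter (l : List String) (x : String) (h : l.Nodup) :
    pvRemoveIfMem l x = l.filter (fun y => y != x) := by
  unfold pvRemoveIfMem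
  by_cases hx : x ∈ l
  · rw [if_pos (by simpa using hx), PySem.List.remove?_eq_some_erase l x hx]
    simp [List.Nodup.erase_eq_filter h]
  · rw [if_neg (by simpa using hx)]
    refine (List.filter_eq_self.mpr fun y hy => ?_).symm
    simp only [bne_iff_ne, ne_eq]
    rintro rfl
    exact hx hy

theorem pvResolve_eq (c1 c2 : List String) : pvResolve c1 c2 = pvResolventsB c1 c2 := by
  unfold pvResolve pvResolventsB
  have hm : (PySem.Set.union (PySem.Set.ofList c1) c2 : List String)
      = PySem.List.dedup (c1 ++ c2) := by
    simp [PySem.Set.union, PySem.Set.ofList_append]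
  have hnd : (PySem.List.dedup (c1 ++ c2)).Nodup := PySem.List.nodup_dedup _
  congr 1
  funext out l1
  congr 1
  funext out2 l2
  split
  · have hpq : (fun a => a != PySem.Str.replace l2 "!" "" && a != l1)
        = (fun a => a != l1 && a != PySem.Str.replace l2 "!" "") := by
      funext a
      rw [Bool.and_comm]
    rw [hm, pvRemoveIfMem_eq_filter _ _ hnd,
        pvRemoveIfMem_eq_filter _ _ (hnd.filter _), List.filter_filter, hpq]
  · rfl

-- completeness of a round ----------------------------------------------------

theorem pvPairFoldA_mem (prev : List (List String)) :
    ∀ (rs : List (List String)) (acc : List (List String)),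
      (∀ x ∈ prev, x ∈ acc) → ∀ r ∈ rs, r ∈ rs.foldl (pvAddNewA prev) acc := by
  intro rs
  induction rs with
  | nil => intro acc _ r hr; cases hr
  | cons r0 t ih =>
    intro acc hsub r hr
    have hpre : acc <+: pvAddNewA prev acc r0 := pvAddNewA_prefix prev acc r0
    have hsub' : ∀ x ∈ prev, x ∈ pvAddNewA prev acc r0 := fun x hx => hpre.subset (hsub x hx)
    rcases List.mem_cons.mp hr with heq | hrt
    · subst heq
      have hr0 : r ∈ pvAddNewA prev acc r := by
        unfold pvAddNewA
        split
        · exact List.mem_append_right _ (List.mem_singleton.mpr rfl)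
        · rename_i hcond
          have himp : r ∉ acc → r ∈ prev := by
            simpa [Bool.not_and, Decidable.not_not] using hcond
          by_cases hacc : r ∈ acc
          · exact hacc
          · exact hsub r (himp hacc)
      exact (pvPairFoldA_prefix prev t _).subset hr0
    · exact ih _ hsub' r hrt

theorem pvRoundA_complete (prev acc0 : List (List String))
    (hsub : ∀ x ∈ prev, x ∈ acc0) :
    ∀ i j, i < j → j < prev.length →
      ∀ r ∈ pvResolve (prev.getD i []) (prev.getD j []), r ∈ pvRoundA prev acc0 := by
  intro i j hij hj r hr
  unfold pvRoundA
  refine pvFoldlReach _ (fun s => ∀ x ∈ prev, x ∈ s) (fun s => r ∈ s)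
      (fun s a hI x hx => (pvInnerA_prefix prev a _ s).subset (hI x hx))
      (fun s a hP => (pvInnerA_prefix prev a _ s).subset hP)
      i ?_ _ (List.mem_range.mpr (Nat.lt_trans hij hj)) acc0 hsub
  intro s hI
  refine pvFoldlReach
      (f := fun acc j => (pvResolve (prev.getD i []) (prev.getD j [])).foldl (pvAddNewA prev) acc)
      (I := fun s => ∀ x ∈ prev, x ∈ s) (P := fun s => r ∈ s)
      (fun s a hI x hx => (pvPairFoldA_prefix prev _ s).subset (hI x hx))
      (fun s a hP => (pvPairFoldA_prefix prev _ s).subset hP)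
      j (fun s hI => pvPairFoldA_mem prev _ s hI r hr)
      (List.range' (i+1) (prev.length - (i+1)))
      (List.mem_range'_1.mpr ⟨hij, show j < (i+1) + (prev.length - (i+1)) by omega⟩) s hI

-- round A = round B ----------------------------------------------------------

def pvINV (L : List (List String)) (lo : Nat) : Prop :=
  ∀ i j, i < j → j < lo → ∀ r ∈ pvResolve (L.getD i []) (L.getD j []), r ∈ L

theorem pvStep_eq (prev : List (List String)) (i j : Nat) :
    ∀ acc, (∀ x ∈ prev, x ∈ acc) →
      (pvResolve (prev.getD i []) (prev.getD j [])).foldl (pvAddNewA prev) acc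
        = (pvResolventsB (prev.getD i []) (prev.getD j [])).foldl pvAddNewB acc := by
  intro acc hsub
  rw [← pvResolve_eq]
  refine pvFoldlCongrInv (pvAddNewA prev) pvAddNewB (fun s => ∀ x ∈ prev, x ∈ s)
      (fun s a hI x hx => (pvAddNewA_prefix prev s a).subset (hI x hx)) ?_ _ acc hsub
  intro s a hI
  unfold pvAddNewA pvAddNewB
  by_cases hs : a ∈ s
  · simp [hs]
  · have hp : a ∉ prev := fun hmem => hs (hI a hmem)
    simp [hs, hp]

theorem pvPairFoldA_noop (prev : List (List String)) :
    ∀ (rs : List (List String)) (acc : List (List String)),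
      (∀ r ∈ rs, r ∈ acc) → rs.foldl (pvAddNewA prev) acc = acc := by
  intro rs
  induction rs with
  | nil => intro acc _; rfl
  | cons r0 t ih =>
    intro acc h
    have hc : acc.contains r0 = true := by
      simpa using h r0 (by simp)
    have h0 : pvAddNewA prev acc r0 = acc := by
      unfold pvAddNewA
      rw [hc]
      simp
    show List.foldl (pvAddNewA prev) (pvAddNewA prev acc r0) t = acc
    rw [h0]
    exact ih acc (fun r hr => h r (List.mem_cons_of_mem _ hr))

theorem pvRound_eq (prev : List (List String)) (lo : Nat) (hlo : lo ≤ prev.length)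
    (hinv : pvINV prev lo) :
    ∀ acc0, (∀ x ∈ prev, x ∈ acc0) → pvRoundA prev acc0 = pvRoundB prev lo acc0 := by
  intro acc0 hsub
  unfold pvRoundA pvRoundB
  refine pvFoldlCongrInv _ _ (fun s => ∀ x ∈ prev, x ∈ s)
      (fun s i hI x hx => (pvInnerA_prefix prev i _ s).subset (hI x hx)) ?_ _ acc0 hsub
  intro acc i hI
  by_cases hcase : lo ≤ i + 1
  · rw [Nat.max_eq_left hcase]
    exact pvFoldlCongrInv _ _ (fun s => ∀ x ∈ prev, x ∈ s)
      (fun s j hJ x hx => (pvPairFoldA_prefix prev _ s).subset (hJ x hx))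
      (fun s j hJ => pvStep_eq prev i j s hJ) _ acc hI
  · have hil : i + 1 < lo := Nat.lt_of_not_le hcase
    rw [Nat.max_eq_right (Nat.le_of_lt hil)]
    have hsplit : List.range' (i+1) (prev.length - (i+1))
        = List.range' (i+1) (lo - (i+1)) ++ List.range' lo (prev.length - lo) := by
      have := List.range'_append (s := i+1) (m := lo - (i+1)) (n := prev.length - lo) (step := 1)
      rw [show (i+1) + 1 * (lo - (i+1)) = lo by omega] at this
      rw [show (lo - (i+1)) + (prev.length - lo) = prev.length - (i+1) by omega] at this
      exact this.symm
    rw [hsplit, List.foldl_append]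
    have hnoop : ∀ (js : List Nat) (acc : List (List String)),
        (∀ x ∈ prev, x ∈ acc) → (∀ j ∈ js, i < j ∧ j < lo) →
        js.foldl (fun acc j =>
          (pvResolve (prev.getD i []) (prev.getD j [])).foldl (pvAddNewA prev) acc) acc = acc := by
      intro js
      induction js with
      | nil => intro acc _ _; rfl
      | cons j0 t ihj =>
        intro acc hI hjs
        obtain ⟨hij0, hj0lo⟩ := hjs j0 (List.mem_cons_self ..)
        have h0 : (pvResolve (prev.getD i []) (prev.getD j0 [])).foldl (pvAddNewA prev) acc = acc :=
          pvPairFoldA_noop prev _ acc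
            (fun r hr => hI r (hinv i j0 hij0 hj0lo r hr))
        show List.foldl _ ((pvResolve (prev.getD i []) (prev.getD j0 [])).foldl (pvAddNewA prev) acc) t = acc
        rw [h0]
        exact ihj acc hI (fun j hj => hjs j (List.mem_cons_of_mem _ hj))
    rw [hnoop _ acc hI (fun j hj => by
      have := List.mem_range'_1.mp hj
      omega)]
    exact pvFoldlCongrInv _ _ (fun s => ∀ x ∈ prev, x ∈ s)
      (fun s j hJ x hx => (pvPairFoldA_prefix prev _ s).subset (hJ x hx))
      (fun s j hJ => pvStep_eq prev i j s hJ) _ acc hI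

-- the closed frontier pass and loop ------------------------------------------

theorem pvRoundB_self (L acc : List (List String)) : pvRoundB L L.length acc = acc := by
  unfold pvRoundB
  have h : ∀ (is : List Nat) (acc : List (List String)),
      is.foldl (fun acc i =>
        (List.range' (max (i+1) L.length) (L.length - max (i+1) L.length)).foldl (fun acc j =>
          (pvResolventsB (L.getD i []) (L.getD j [])).foldl pvAddNewB acc) acc) acc = acc := by
    intro is
    induction is with
    | nil => intro acc; rfl
    | cons i0 t ih =>
      intro acc
      have hz : L.length - max (i0+1) L.length = 0 := by
        have := Nat.le_max_right (i0+1) L.length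
        omega
      show List.foldl _ ((List.range' (max (i0+1) L.length) (L.length - max (i0+1) L.length)).foldl _ acc) t = acc
      rw [hz]
      exact ih acc
  exact h _ acc

theorem pvLoopB_fix : ∀ (f : Nat) (L : List (List String)), pvLoopB f L L.length = L := by
  intro f
  induction f with
  | zero => intro L; rfl
  | succ f _ => intro L; simp [pvLoopB]

theorem pvINV_next (prev : List (List String)) : pvINV (pvRoundA prev prev) prev.length := by
  intro i j hij hj r hr
  obtain ⟨t, ht⟩ := pvRoundA_prefix prev prev
  rw [← ht, List.getD_append _ _ _ i (Nat.lt_trans hij hj), List.getD_append _ _ _ j hj] at hr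
  exact pvRoundA_complete prev prev (fun x hx => hx) i j hij hj r hr

theorem pvLoop_eq : ∀ (f : Nat) (L : List (List String)) (lo : Nat),
    lo ≤ L.length → pvINV L lo → pvLoopA f L = pvLoopB f L lo := by
  intro f
  induction f with
  | zero => intro L lo _ _; rfl
  | succ f ih =>
    intro L lo hlo hinv
    show (if (pvRoundA L L == L) = true then L else pvLoopA f (pvRoundA L L))
        = if lo < L.length then pvLoopB f (pvRoundB L lo L) L.length else L
    by_cases hl : lo < L.length
    · have hr : pvRoundA L L = pvRoundB L lo L := pvRound_eq L lo hlo hinv L (fun x hx => hx)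
      rw [if_pos hl]
      by_cases hfix : pvRoundA L L = L
      · rw [if_pos (show (pvRoundA L L == L) = true from beq_iff_eq.mpr hfix)]
        rw [← hr, hfix, pvLoopB_fix]
      · rw [if_neg (show ¬((pvRoundA L L == L) = true) from fun hb => hfix (beq_iff_eq.mp hb))]
        have hlen : L.length ≤ (pvRoundA L L).length := (pvRoundA_prefix L L).length_le
        rw [ih (pvRoundA L L) L.length hlen (pvINV_next L), hr]
    · have hloeq : lo = L.length := Nat.le_antisymm hlo (Nat.not_lt.mp hl)
      subst hloeq
      have hfix : pvRoundA L L = L := by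
        rw [pvRound_eq L L.length le_rfl hinv L (fun x hx => hx), pvRoundB_self]
      rw [if_neg hl, if_pos (show (pvRoundA L L == L) = true from beq_iff_eq.mpr hfix)]

-- ===== VERDICT (by name: the statement is the Claim_ definition above) =====
theorem resolve_all_spec : Claim_equal_resolve_all := by
  intro clauses _
  unfold Spec_resolve_all resolve_all resolve_all_alt
  rw [pvLoop_eq (pvFuel clauses) clauses 0 (Nat.zero_le _)
      (fun i j _ hj => absurd hj (Nat.not_lt_zero j))]
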